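-- pv_equiv track=rewrite | github.com/Leon-ED/but-crypto | crypto_but.py | encrypte_encore_mieux
-- ===== SOURCE A (Python) =====
-- def encrypte_aux(lettre,cle,c):
--     etape1 = (ord(lettre)-ord(c)+cle)%26
--     etape2 = etape1+ord(c)
--     return chr(etape2)
--
-- def encrypte_lettre(lettre, cle):
--   """
--   >>> encrypte_lettre('a',10), encrypte_lettre('a',26)
--   ('k', 'a')
--   >>> encrypte_lettre('z',1), encrypte_lettre('a',260)
--   ('a', 'a')
--   >>> encrypte_lettre('A',10), encrypte_lettre('A',26)
--   ('K', 'A')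
--   >>> encrypte_lettre('w',10), encrypte_lettre('W',10)
--   ('g', 'G')
--   """
--
--   if not lettre.isalpha():
--     return lettre
--   if lettre.islower():
--     return encrypte_aux(lettre,cle,'a')
--   return encrypte_aux(lettre,cle,'A')
--
-- def encrypte_encore_mieux(texte, cle, decal):
--   """
--   >>> encrypte_encore_mieux('abc de f ghijk lmnopqrstuvw xyz',3,7)
--   'def no w efghi qrstuvwxyzab jkl'
--   >>> encrypte_encore_mieux('Toto est une girafe, avec des petites jambes.',3,7)
--   'Wrwr ocd lev egpydc, fajh pqe ixmbmxl jambes.'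
--   """
--   mot = ""
--   cle2 = cle
--   for i in range(len(texte)):
--     mot += encrypte_lettre(texte[i],cle2)
--     if texte[i] == " ":
--       cle2 += decal
--   return mot
-- ===== SOURCE B (Python) =====
-- def encrypte_aux(lettre, cle, c):
--     return chr((ord(lettre) - ord(c) + cle) % 26 + ord(c))
--
-- def encrypte_lettre(lettre, cle):
--     if not lettre.isalpha():
--         return lettre
--     if lettre.islower():
--         return encrypte_aux(lettre, cle, 'a')
--     return encrypte_aux(lettre, cle, 'A')
--
-- def encrypte_encore_mieux(texte, cle, decal):
--     mots = texte.split(" ")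
--     return " ".join(
--         "".join(encrypte_lettre(ch, cle + i * decal) for ch in mot)
--         for i, mot in enumerate(mots)
--     )
-- ===== Notes on version B (the rewrite author's own statement) =====
-- stated objective: simpler
-- what changed: Replaces A's flat per-character scan that mutates the key at every space with a split(" ")/enumerate/join decomposition where word i is encrypted with the closed-form key cle + i*decal.
import Mathlib
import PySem

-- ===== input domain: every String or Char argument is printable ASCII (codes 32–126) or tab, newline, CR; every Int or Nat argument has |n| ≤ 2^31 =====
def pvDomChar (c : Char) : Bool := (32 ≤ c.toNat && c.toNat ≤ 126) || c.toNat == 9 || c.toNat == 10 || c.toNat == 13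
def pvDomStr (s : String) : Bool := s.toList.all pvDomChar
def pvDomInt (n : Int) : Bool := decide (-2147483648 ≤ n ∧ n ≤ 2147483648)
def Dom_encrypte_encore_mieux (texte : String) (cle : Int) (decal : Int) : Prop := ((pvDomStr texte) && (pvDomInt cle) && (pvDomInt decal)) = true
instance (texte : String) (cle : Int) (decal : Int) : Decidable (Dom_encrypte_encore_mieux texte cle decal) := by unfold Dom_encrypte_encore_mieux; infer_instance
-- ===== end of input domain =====

-- B replaces A's stateful per-character scan (key bumped at each space) by splitting on " " and
-- encrypting word i with the closed-form key cle + i*decal; objective: simpler.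

-- ===== PORT A =====
def encrypte_aux (lettre : Char) (cle : Int) (c : Char) : Char :=
  let etape1 := PySem.Int.mod ((lettre.toNat : Int) - (c.toNat : Int) + cle) 26
  let etape2 := etape1 + (c.toNat : Int)
  Char.ofNat etape2.toNat

def encrypte_lettre (lettre : Char) (cle : Int) : Char :=
  if ¬ PySem.Chars.isalpha lettre then lettre
  else if PySem.Chars.islower lettre then encrypte_aux lettre cle 'a'
  else encrypte_aux lettre cle 'A'

def encrypte_encore_mieux (texte : String) (cle : Int) (decal : Int) : String :=
  (texte.toList.foldl
    (fun (st : String × Int) ch =>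
      (st.1 ++ String.singleton (encrypte_lettre ch st.2),
       if ch = ' ' then st.2 + decal else st.2))
    ("", cle)).1

-- ===== PORT B =====
-- hand port of str.split(" ") for the single-char separator " " (empty segments kept) — exact
def pySplitSpace : List Char → List (List Char)
  | [] => [[]]
  | c :: cs =>
    let r := pySplitSpace cs
    if c = ' ' then [] :: r
    else
      match r with
      | [] => [[c]]
      | w :: ws => (c :: w) :: ws

def encrypte_encore_mieux_alt (texte : String) (cle : Int) (decal : Int) : String :=
  let mots := pySplitSpace texte.toList
  String.mk (PySem.Chars.join [' ']
    ((PySem.List.enumerate mots 0).map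
      (fun p => p.2.map (fun ch => encrypte_lettre ch (cle + p.1 * decal)))))

-- ===== PRECONDITION & SPEC =====
def Spec_encrypte_encore_mieux (texte : String) (cle : Int) (decal : Int) (out : String) : Prop := out = encrypte_encore_mieux_alt texte cle decal
instance (texte : String) (cle : Int) (decal : Int) (out : String) : Decidable (Spec_encrypte_encore_mieux texte cle decal out) := by unfold Spec_encrypte_encore_mieux; infer_instance

-- ===== CLAIM (what is proved, stated in full; the proofs are below) =====
def Claim_equal_encrypte_encore_mieux : Prop := ∀ (texte : String) (cle : Int) (decal : Int), Dom_encrypte_encore_mieux texte cle decal → Spec_encrypte_encore_mieux texte cle decal (encrypte_encore_mieux texte cle decal)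

-- ===== LEMMAS AND PROOFS =====

-- A's loop, as a pure recursion on the character list
def auxRun (decal : Int) : List Char → Int → List Char
  | [], _ => []
  | c :: cs, k => encrypte_lettre c k :: auxRun decal cs (if c = ' ' then k + decal else k)

-- B's per-word encryption with the key threaded ward by word
def mapKeys (decal : Int) : List (List Char) → Int → List (List Char)
  | [], _ => []
  | w :: ws, k => w.map (fun ch => encrypte_lettre ch k) :: mapKeys decal ws (k + decal)

theorem encrypte_lettre_space (k : Int) : encrypte_lettre ' ' k = ' ' := by
  unfold encrypte_lettre
  rw [if_pos (by decide)]

theorem pySplitSpace_ne_nil (cs : List Char) : pySplitSpace cs ≠ [] := by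
  cases cs with
  | nil => simp [pySplitSpace]
  | cons c cs =>
    simp only [pySplitSpace]
    split
    · simp
    · cases h : pySplitSpace cs <;> simp

theorem join_cons_head (c : Char) (w : List Char) (ws : List (List Char)) :
    PySem.Chars.join [' '] ((c :: w) :: ws) = c :: PySem.Chars.join [' '] (w :: ws) := by
  cases ws with
  | nil => simp [PySem.Chars.join, List.intercalate]
  | cons w' ws' => simp [PySem.Chars.join, List.intercalate, List.intersperse]

theorem foldl_toList (decal : Int) (cs : List Char) :
    ∀ (acc : String) (k : Int),
      ((cs.foldl
        (fun (st : String × Int) ch =>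
          (st.1 ++ String.singleton (encrypte_lettre ch st.2),
           if ch = ' ' then st.2 + decal else st.2))
        (acc, k)).1).toList = acc.toList ++ auxRun decal cs k := by
  induction cs with
  | nil => intro acc k; simp [auxRun]
  | cons c cs ih =>
    intro acc k
    simp only [List.foldl_cons, auxRun, ih]
    simp

theorem auxRun_eq_split (decal : Int) (cs : List Char) :
    ∀ k : Int, auxRun decal cs k = PySem.Chars.join [' '] (mapKeys decal (pySplitSpace cs) k) := by
  induction cs with
  | nil => intro k; simp [auxRun, pySplitSpace, mapKeys, PySem.Chars.join, List.intercalate]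
  | cons c cs ih =>
    intro k
    by_cases hc : c = ' '
    · subst hc
      cases h : pySplitSpace cs with
      | nil => exact absurd h (pySplitSpace_ne_nil cs)
      | cons w ws =>
        simp only [pySplitSpace, if_pos rfl, auxRun, encrypte_lettre_space, ih, h, mapKeys,
          List.map_nil]
        simp [PySem.Chars.join, List.intercalate, mapKeys]
    · cases h : pySplitSpace cs with
      | nil => exact absurd h (pySplitSpace_ne_nil cs)
      | cons w ws =>
        simp only [pySplitSpace, if_neg hc, h, auxRun, ih, mapKeys, List.map_cons]
        rw [join_cons_head]

theorem mapKeys_eq_enumerate (decal cle : Int) (ws : List (List Char)) :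
    ∀ j : Int, mapKeys decal ws (cle + j * decal) =
      (PySem.List.enumerate ws j).map
        (fun p => p.2.map (fun ch => encrypte_lettre ch (cle + p.1 * decal))) := by
  induction ws with
  | nil => intro j; simp [mapKeys, PySem.List.enumerate_nil]
  | cons w ws ih =>
    intro j
    have h : cle + j * decal + decal = cle + (j + 1) * decal := by ring
    simp only [mapKeys, PySem.List.enumerate_cons, List.map_cons, h, ih]

-- ===== VERDICT (by name: the statement is the Claim_ definition above) =====
theorem encrypte_encore_mieux_spec : Claim_equal_encrypte_encore_mieux := by
  intro texte cle decal _
  unfold Spec_encrypte_encore_mieux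
  unfold encrypte_encore_mieux encrypte_encore_mieux_alt
  have h1 := foldl_toList decal texte.toList "" cle
  have h2 := auxRun_eq_split decal texte.toList cle
  have h3 := mapKeys_eq_enumerate decal cle (pySplitSpace texte.toList) 0
  simp only [zero_mul, add_zero] at h3
  have htl :
      ((texte.toList.foldl
        (fun (st : String × Int) ch =>
          (st.1 ++ String.singleton (encrypte_lettre ch st.2),
           if ch = ' ' then st.2 + decal else st.2))
        ("", cle)).1).toList =
      PySem.Chars.join [' ']
        ((PySem.List.enumerate (pySplitSpace texte.toList) 0).map
          (fun p => p.2.map (fun ch => encrypte_lettre ch (cle + p.1 * decal)))) := by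
    rw [h1, h2, h3]; simp
  have h4 := congrArg String.mk htl
  rw [show (String.mk (List.foldl (fun (st : String × Int) ch => (st.1 ++ String.singleton (encrypte_lettre ch st.2), if ch = ' ' then st.2 + decal else st.2)) ("", cle) texte.toList).1.toList) = _ from String.ofList_toList] at h4
  exact h4
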